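-- pv_equiv track=rewrite | github.com/NJOYs7/CU-ENGINEERING-Grader_Y1_2024 | 09/09_MoreDC_34.py | pattern4
-- ===== SOURCE A (Python) =====
-- def pattern4( N ):
--     P4 = [[0]*N for i in range(N)]
--     i = 1
--     for c in range(N):
--         for r in range(c,-1,-1):
--             P4[r][c] = i
--             i += 1
--     return P4
-- ===== SOURCE B (Python) =====
-- def pattern4(N):
--     # Closed form: cell (r, c) holds 1 + c*(c+1)//2 + (c - r) on/above the diagonal, else 0.
--     return [[1 + c * (c + 1) // 2 + (c - r) if r <= c else 0 for c in range(N)]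
--             for r in range(N)]
-- ===== Notes on version B (the rewrite author's own statement) =====
-- stated objective: simpler
-- what changed: Replaces the stateful counter run through nested diagonal-filling loops by a nested comprehension computing each cell directly from its coordinates via the closed form 1 + c*(c+1)//2 + (c - r).
import Mathlib
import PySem

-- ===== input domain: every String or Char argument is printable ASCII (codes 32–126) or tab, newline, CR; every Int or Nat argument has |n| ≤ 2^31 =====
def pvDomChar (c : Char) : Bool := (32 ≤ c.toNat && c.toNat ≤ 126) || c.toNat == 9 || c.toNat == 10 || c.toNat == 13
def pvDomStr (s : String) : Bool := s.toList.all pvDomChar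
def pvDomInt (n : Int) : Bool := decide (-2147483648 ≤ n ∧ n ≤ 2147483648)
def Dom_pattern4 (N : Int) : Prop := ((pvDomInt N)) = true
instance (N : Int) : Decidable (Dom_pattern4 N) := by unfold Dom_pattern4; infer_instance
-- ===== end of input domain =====

-- B replaces A's stateful counter threaded through nested diagonal-filling loops by a
-- nested comprehension computing each cell from its coordinates (closed form); objective: simpler.


-- ===== PORT A =====
-- `[0]*N` is [] for N < 0 in Python; `List.replicate N.toNat` matches (toNat clamps to 0).
def pattern4 (N : Int) : List (List Int) :=
  ((PySem.List.pyRange 0 N 1).foldl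
    (fun (st : List (List Int) × Int) c =>
      (PySem.List.pyRange c (-1) (-1)).foldl
        (fun (st2 : List (List Int) × Int) r =>
          (PySem.List.pySetD st2.1 r (PySem.List.pySetD (PySem.List.pyGetD st2.1 r []) c st2.2),
           st2.2 + 1))
        st)
    ((PySem.List.pyRange 0 N 1).map (fun _ => List.replicate N.toNat (0 : Int)), 1)).1

-- ===== PORT B =====
def pattern4_alt (N : Int) : List (List Int) :=
  (PySem.List.pyRange 0 N 1).map (fun r =>
    (PySem.List.pyRange 0 N 1).map (fun c =>
      if r ≤ c then 1 + PySem.Int.floordiv (c * (c + 1)) 2 + (c - r) else 0))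

-- ===== PRECONDITION & SPEC =====
def Spec_pattern4 (N : Int) (out : List (List Int)) : Prop := out = pattern4_alt N
instance (N : Int) (out : List (List Int)) : Decidable (Spec_pattern4 N out) := by unfold Spec_pattern4; infer_instance

-- ===== CLAIM (what is proved, stated in full; the proofs are below) =====
def Claim_equal_pattern4 : Prop := ∀ (N : Int), Dom_pattern4 N → Spec_pattern4 N (pattern4 N)

-- ===== LEMMAS AND PROOFS =====

-- n×n matrix whose entry at row r, column c is F r c
def pvMk (n : Nat) (F : Nat → Nat → Int) : List (List Int) :=
  (List.range n).map (fun r => (List.range n).map (fun c => F r c))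

theorem pvMk_congr (n : Nat) (F G : Nat → Nat → Int)
    (h : ∀ r c, r < n → c < n → F r c = G r c) : pvMk n F = pvMk n G := by
  unfold pvMk
  refine List.map_congr_left (fun r hr => List.map_congr_left (fun c hc => ?_))
  exact h r c (List.mem_range.mp hr) (List.mem_range.mp hc)

-- effect of Python's `P4[r][c] = v` on a pvMk matrix (0 ≤ r, c < n)
theorem pvMk_set (n : Nat) (F : Nat → Nat → Int) (r c v : Int)
    (hr0 : 0 ≤ r) (hrn : r < n) (hc0 : 0 ≤ c) (hcn : c < n) :
    PySem.List.pySetD (pvMk n F) r (PySem.List.pySetD (PySem.List.pyGetD (pvMk n F) r []) c v)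
    = pvMk n (fun r' c' => if r' = r.toNat ∧ c' = c.toNat then v else F r' c') := by
  have hrn' : r.toNat < n := by omega
  have hcn' : c.toNat < n := by omega
  have hlen : (pvMk n F).length = n := by simp [pvMk]
  have hget : PySem.List.pyGetD (pvMk n F) r [] = (List.range n).map (fun c' => F r.toNat c') := by
    rw [PySem.List.pyGetD_eq_getElem _ _ hr0 (by omega)]
    simp [pvMk]
  rw [hget, PySem.List.pySetD_of_nonneg _ _ hc0, PySem.List.pySetD_of_nonneg _ _ hr0]
  apply List.ext_getElem
  · simp [pvMk]
  intro i hi1 hi2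
  simp only [pvMk, List.length_set, List.length_map, List.length_range] at hi1 hi2
  simp only [List.getElem_set]
  by_cases hir : r.toNat = i
  · subst hir
    simp only [pvMk, List.getElem_map, List.getElem_range]
    simp only [if_true, true_and]
    apply List.ext_getElem
    · simp
    intro j hj1 hj2
    simp only [List.length_set, List.length_map, List.length_range] at hj1 hj2
    simp only [List.getElem_set, List.getElem_map, List.getElem_range]
    by_cases hjc : c.toNat = j
    · subst hjc; simp
    · have h2 : ¬ (j = c.toNat) := fun h => hjc h.symm
      simp [h2]
      exact fun h => absurd h hjc
  · simp only [if_neg hir, pvMk, List.getElem_map, List.getElem_range]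
    apply List.map_congr_left
    intro j hj
    have h2 : ¬ (i = r.toNat) := fun h => hir h.symm
    simp [h2]

-- inner loop: writes column c for rows t-1 down to 0, counter advances by t
theorem pv_inner (t : Nat) (n : Nat) (c : Int) (F : Nat → Nat → Int) (i : Int)
    (hc0 : 0 ≤ c) (hcn : c < n) (ht : t ≤ c.toNat + 1) :
    (PySem.List.pyRange ((t : Int) - 1) (-1) (-1)).foldl
      (fun (st2 : List (List Int) × Int) r =>
        (PySem.List.pySetD st2.1 r (PySem.List.pySetD (PySem.List.pyGetD st2.1 r []) c st2.2),
         st2.2 + 1))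
      (pvMk n F, i)
    = (pvMk n (fun r' c' => if c' = c.toNat ∧ r' < t then i + ((t : Int) - 1 - r') else F r' c'),
       i + t) := by
  induction t generalizing F i with
  | zero =>
    rw [show ((0:Nat):Int) - 1 = -1 by ring, PySem.List.pyRange_neg_one_eq_nil le_rfl]
    simp only [List.foldl_nil, Prod.mk.injEq]
    refine ⟨pvMk_congr _ _ _ ?_, by simp⟩
    intro r' c' _ _
    simp
  | succ t ih =>
    have h1 : ((t+1 : Nat) : Int) - 1 = (t : Int) := by push_cast; ring
    rw [h1, PySem.List.pyRange_neg_one_cons (by omega : (-1:Int) < t), List.foldl_cons]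
    rw [pvMk_set n F t c i (by omega) (by omega) hc0 hcn]
    have h2 : ((t:Int)) - 1 = ((t:Nat):Int) - 1 := by norm_num
    rw [h2, ih _ _ (by omega)]
    rw [Prod.mk.injEq]
    constructor
    · apply pvMk_congr
      intro r' c' _ _
      simp only [Int.toNat_natCast]
      split_ifs <;> first | rfl | omega
    · push_cast; ring

-- the closed-form cell value of B, on Nat coordinates
def pvF (r c : Nat) : Int := 1 + ((c * (c + 1)) / 2 : Nat) + ((c : Int) - r)

-- outer loop invariant: after columns 0..m-1, the matrix holds pvF below-diagonal-left of m
theorem pv_outer (m n : Nat) (hm : m ≤ n) :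
    (PySem.List.pyRange 0 (m : Int) 1).foldl
      (fun (st : List (List Int) × Int) c =>
        (PySem.List.pyRange c (-1) (-1)).foldl
          (fun (st2 : List (List Int) × Int) r =>
            (PySem.List.pySetD st2.1 r (PySem.List.pySetD (PySem.List.pyGetD st2.1 r []) c st2.2),
             st2.2 + 1))
          st)
      (pvMk n (fun _ _ => 0), 1)
    = (pvMk n (fun r c => if r ≤ c ∧ c < m then pvF r c else 0),
       (1 : Int) + ((m * (m + 1)) / 2 : Nat)) := by
  induction m with
  | zero =>
    rw [show ((0:Nat):Int) = 0 by rfl, PySem.List.pyRange_one_eq_nil le_rfl]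
    simp only [List.foldl_nil, Prod.mk.injEq]
    refine ⟨pvMk_congr _ _ _ ?_, by simp⟩
    intro r' c' _ _
    simp
  | succ m ih =>
    have hcast : ((m+1 : Nat) : Int) = (m : Int) + 1 := by push_cast; ring
    rw [hcast, PySem.List.pyRange_one_succ_right (by positivity), List.foldl_append,
        ih (by omega), List.foldl_cons, List.foldl_nil]
    have hstart : (m : Int) = ((m+1 : Nat) : Int) - 1 := by push_cast; ring
    rw [show PySem.List.pyRange (m : Int) (-1) (-1) = PySem.List.pyRange (((m+1 : Nat) : Int) - 1) (-1) (-1) by rw [← hstart]]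
    rw [pv_inner (m+1) n (m : Int) _ _ (by positivity) (by omega) (by omega)]
    rw [Prod.mk.injEq]
    constructor
    · apply pvMk_congr
      intro r' c' _ _
      simp only [Int.toNat_natCast]
      have hmod : m * (m + 1) % 2 = 0 := Nat.even_iff.mp (Nat.even_mul_succ_self m)
      have hval : ((m+1) * (m+1+1) / 2 : Nat) = (m * (m+1) / 2 : Nat) + (m+1) := by
        have hr : (m+1) * (m+1+1) = m * (m+1) + 2*(m+1) := by ring
        omega
      by_cases hcm : c' = m
      · subst hcm
        by_cases hr' : r' ≤ c'
        · rw [if_pos ⟨rfl, by omega⟩, if_pos ⟨hr', by omega⟩]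
          unfold pvF
          omega
        · rw [if_neg (by omega), if_neg (by omega), if_neg (by omega)]
      · rw [if_neg (by tauto)]
        by_cases h2 : r' ≤ c' ∧ c' < m
        · rw [if_pos h2, if_pos ⟨h2.1, by omega⟩]
        · rw [if_neg h2, if_neg (by omega)]
    · have hmod : m * (m + 1) % 2 = 0 := Nat.even_iff.mp (Nat.even_mul_succ_self m)
      have hr : (m+1) * (m+1+1) = m * (m+1) + 2*(m+1) := by ring
      omega

theorem pattern4_alt_eq (N : Int) :
    pattern4_alt N = pvMk N.toNat (fun r c => if r ≤ c ∧ c < N.toNat then pvF r c else 0) := by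
  unfold pattern4_alt
  have hN : (N - 0).toNat = N.toNat := by omega
  simp only [PySem.List.pyRange_one, pvMk, List.map_map, hN, Function.comp_def]
  refine List.map_congr_left (fun r hr => List.map_congr_left (fun c hc => ?_))
  rw [List.mem_range] at hr hc
  simp only [zero_add, Nat.cast_le]
  by_cases h : r ≤ c
  · simp only [h, hc, and_true, if_true, pvF]
    have h2 : ((c : Int)) * (c + 1) = ((c*(c+1) : Nat) : Int) := by push_cast; ring
    have h3 : PySem.Int.floordiv ((c*(c+1) : Nat) : Int) 2 = ((c*(c+1)/2 : Nat) : Int) := by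
      exact_mod_cast PySem.Int.floordiv_natCast (c*(c+1)) 2
    rw [h2, h3]
  · simp [h]

theorem pvInit_eq (N : Int) :
    (PySem.List.pyRange 0 N 1).map (fun _ => List.replicate N.toNat (0 : Int))
      = pvMk N.toNat (fun _ _ => (0 : Int)) := by
  simp [PySem.List.pyRange_one, pvMk, Function.comp_def, List.map_const']

theorem pyRange_zero_toNat (N : Int) :
    PySem.List.pyRange 0 N 1 = PySem.List.pyRange 0 (N.toNat : Int) 1 := by
  rw [PySem.List.pyRange_one, PySem.List.pyRange_one]
  have h : (N - 0).toNat = ((N.toNat : Int) - 0).toNat := by omega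
  rw [h]

-- ===== VERDICT (by name: the statement is the Claim_ definition above) =====
theorem pattern4_spec : Claim_equal_pattern4 := by
  intro N _
  show pattern4 N = pattern4_alt N
  unfold pattern4
  rw [pattern4_alt_eq, pvInit_eq, pyRange_zero_toNat, pv_outer N.toNat N.toNat le_rfl]
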